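-- pv_equiv track=rewrite | github.com/pypi-data/pypi-mirror-370 | packages/lexer-fdfattor-2025/lexer_fdfattor_2025-1.0.1.tar.gz/lexer_fdfattor_2025-1.0.1/lexer/core.py | afd_asignar
-- ===== SOURCE A (Python) =====
-- ESTADO_FINAL = "ESTADO FINAL"
--
-- ESTADO_NO_FINAL = "NO ACEPTADO"
--
-- ESTADO_TRAMPA = "EN ESTADO TRAMPA"
--
-- def afd_asignar(lexema):
--     estado = 0
--     estados_finales = [1]
--     for c in lexema:
--         if estado == 0 and c == '=':
--             estado = 1
--         else:
--             estado = -1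
--
--     if estado == -1:
--         return ESTADO_TRAMPA
--     if estado in estados_finales:
--         return ESTADO_FINAL
--     else:
--         return ESTADO_NO_FINAL
-- ===== SOURCE B (Python) =====
-- ESTADO_FINAL = "ESTADO FINAL"
--
-- ESTADO_NO_FINAL = "NO ACEPTADO"
--
-- ESTADO_TRAMPA = "EN ESTADO TRAMPA"
--
-- def afd_asignar(lexema):
--     items = list(lexema)
--     if not items:
--         return ESTADO_NO_FINAL
--     if items == ['=']:
--         return ESTADO_FINAL
--     return ESTADO_TRAMPA
-- ===== Notes on version B (the rewrite author's own statement) =====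
-- stated objective: simpler
-- what changed: Replaces the per-character DFA state loop with a direct three-way branch on the materialised input (empty / exactly '=' / anything else).
import Mathlib
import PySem

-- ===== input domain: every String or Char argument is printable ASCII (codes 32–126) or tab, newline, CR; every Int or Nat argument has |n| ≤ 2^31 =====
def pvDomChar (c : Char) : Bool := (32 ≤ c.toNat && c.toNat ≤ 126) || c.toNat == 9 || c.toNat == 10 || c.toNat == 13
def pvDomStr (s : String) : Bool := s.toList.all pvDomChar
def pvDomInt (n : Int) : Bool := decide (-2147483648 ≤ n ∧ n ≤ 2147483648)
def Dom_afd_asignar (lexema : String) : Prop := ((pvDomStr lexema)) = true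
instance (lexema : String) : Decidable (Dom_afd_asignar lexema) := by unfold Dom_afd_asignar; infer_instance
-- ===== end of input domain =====

-- B replaces A's per-character DFA loop by a direct three-way branch; objective: simpler.

-- ===== PORT A =====
def afd_asignar (lexema : String) : String :=
  let estado : Int :=
    lexema.toList.foldl
      (fun estado c => if estado == 0 && c == '=' then 1 else -1) 0
  if estado = -1 then "EN ESTADO TRAMPA"
  else if estado ∈ ([1] : List Int) then "ESTADO FINAL"
  else "NO ACEPTADO"

-- ===== PORT B =====
def afd_asignar_alt (lexema : String) : String :=
  let items := lexema.toList
  if items = [] then "NO ACEPTADO"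
  else if items = ['='] then "ESTADO FINAL"
  else "EN ESTADO TRAMPA"

-- ===== PRECONDITION & SPEC =====
def Spec_afd_asignar (lexema : String) (out : String) : Prop := out = afd_asignar_alt lexema
instance (lexema : String) (out : String) : Decidable (Spec_afd_asignar lexema out) := by unfold Spec_afd_asignar; infer_instance

-- ===== CLAIM (what is proved, stated in full; the proofs are below) =====
def Claim_equal_afd_asignar : Prop := ∀ (lexema : String), Dom_afd_asignar lexema → Spec_afd_asignar lexema (afd_asignar lexema)

-- ===== LEMMAS AND PROOFS =====

-- once the DFA is in the trap state it stays there
theorem foldl_trap (l : List Char) :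
    l.foldl (fun (estado : Int) c => if estado == 0 && c == '=' then 1 else -1) (-1) = -1 := by
  induction l with
  | nil => rfl
  | cons c t ih => simpa using ih

-- from the accepting state, any further character traps
theorem foldl_from_one (l : List Char) (h : l ≠ []) :
    l.foldl (fun (estado : Int) c => if estado == 0 && c == '=' then 1 else -1) 1 = -1 := by
  cases l with
  | nil => exact absurd rfl h
  | cons c t => simpa using foldl_trap t

-- ===== VERDICT (by name: the statement is the Claim_ definition above) =====
theorem afd_asignar_spec : Claim_equal_afd_asignar := by
  intro lexema _
  unfold Spec_afd_asignar afd_asignar afd_asignar_alt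
  cases hl : lexema.toList with
  | nil => simp
  | cons c t =>
    by_cases hc : c = '='
    · subst hc
      cases ht : t with
      | nil => simp
      | cons d u =>
        have := foldl_from_one (d :: u) (by simp)
        simp at this ⊢
        simp [this]
    · have := foldl_trap t
      simp at this ⊢
      simp [hc, this]
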